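-- pv_equiv track=rewrite | github.com/CyberdyneCorp/obsidian_mcp_rest_server | app/domain/services/tag_parser.py | is_valid_tag
-- ===== SOURCE A (Python) =====
-- def is_valid_tag(tag: str) -> bool:
--     """Check if a tag is valid.
--
--     Args:
--         tag: Tag string to validate
--
--     Returns:
--         True if valid
--     """
--     clean_tag = tag.lstrip("#")
--
--     # Must start with a letter
--     if not clean_tag or not clean_tag[0].isalpha():
--         return False
--
--     # Check remaining characters
--     for char in clean_tag:
--         if not (char.isalnum() or char in "_/"):
--             return False
--
--     # No empty parts in hierarchy
--     if "//" in clean_tag: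
--         return False
--
--     # No trailing slash
--     if clean_tag.endswith("/"):
--         return False
--
--     return True
-- ===== SOURCE B (Python) =====
-- def is_valid_tag(tag: str) -> bool:
--     """Check if a tag is valid (hierarchy-part based re-implementation)."""
--     clean_tag = tag.lstrip("#")
--
--     # Must start with a letter
--     if not clean_tag or not clean_tag[0].isalpha():
--         return False
--
--     # Every '/'-separated part must be nonempty and contain only alnum/underscore
--     parts = clean_tag.split("/")
--     return all(
--         part and all(ch.isalnum() or ch == "_" for ch in part)
--         for part in parts
--     )
-- ===== Notes on version B (the rewrite author's own statement) =====
-- stated objective: simpler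
-- what changed: Replaces A's three separate structural checks (character whitelist including the separator, double-separator substring search, trailing-separator test) by splitting the tag into its hierarchy parts once and requiring every part to be nonempty and alnum/underscore.
import Mathlib
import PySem

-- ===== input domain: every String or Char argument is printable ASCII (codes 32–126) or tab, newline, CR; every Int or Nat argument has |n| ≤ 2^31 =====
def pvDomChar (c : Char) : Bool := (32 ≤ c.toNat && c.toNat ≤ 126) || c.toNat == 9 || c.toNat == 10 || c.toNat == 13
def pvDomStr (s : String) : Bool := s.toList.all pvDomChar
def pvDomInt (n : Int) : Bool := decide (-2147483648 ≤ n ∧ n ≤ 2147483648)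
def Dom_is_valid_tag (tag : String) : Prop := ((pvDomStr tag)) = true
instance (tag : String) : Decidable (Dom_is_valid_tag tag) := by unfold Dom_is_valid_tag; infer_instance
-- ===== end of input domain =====

-- B restructures A's validation: instead of a char whitelist plus a double-separator substring and
-- trailing-separator check, it splits into hierarchy parts and validates each part; same result.

-- ===== PORT A =====
-- tag.lstrip("#") with the single strip char '#' is exactly dropWhile (· == '#')
def is_valid_tag (tag : String) : Bool :=
  let clean := tag.toList.dropWhile (· == '#')
  match clean with
  | [] => false                                  -- "if not clean_tag"
  | c :: _ =>
    if !PySem.Chars.isalpha c then false         -- "not clean_tag[0].isalpha()"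
    else if !(clean.all fun ch => PySem.Chars.isalnum ch || (ch == '_' || ch == '/'))
      then false                                 -- the for-loop over clean_tag
    else if PySem.Chars.isIn ['/', '/'] clean then false   -- '"//" in clean_tag'
    else if PySem.Chars.endswith clean ['/'] then false    -- trailing slash
    else true

-- ===== PORT B =====
-- clean_tag.split("/") with a one-char separator is List.splitOn '/'
def is_valid_tag_alt (tag : String) : Bool :=
  let clean := tag.toList.dropWhile (· == '#')
  match clean with
  | [] => false
  | c :: _ =>
    if !PySem.Chars.isalpha c then false
    else (List.splitOn '/' clean).all fun part =>
      !part.isEmpty && part.all fun ch => PySem.Chars.isalnum ch || ch == '_'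

-- ===== PRECONDITION & SPEC =====
def Spec_is_valid_tag (tag : String) (out : Bool) : Prop := out = is_valid_tag_alt tag
instance (tag : String) (out : Bool) : Decidable (Spec_is_valid_tag tag out) := by unfold Spec_is_valid_tag; infer_instance

-- ===== CLAIM (what is proved, stated in full; the proofs are below) =====
def Claim_equal_is_valid_tag : Prop := ∀ (tag : String), Dom_is_valid_tag tag → Spec_is_valid_tag tag (is_valid_tag tag)

-- ===== LEMMAS AND PROOFS =====

def pvGood (c : Char) : Bool := PySem.Chars.isalnum c || c == '_'

/-- Reference scanner: `b = true` means we are at the start of a hierarchy part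
(which must be nonempty and must not begin with '/'). -/
def pvRun (b : Bool) : List Char → Bool
  | [] => !b
  | c :: r => if c == '/' then (if b then false else pvRun true r)
              else pvGood c && pvRun false r

theorem pvSplit_eq_run (cs : List Char) :
    ((List.splitOnP (· == '/') cs).all fun part =>
        !part.isEmpty && part.all fun ch => PySem.Chars.isalnum ch || ch == '_') = pvRun true cs ∧
    (((List.splitOnP (· == '/') cs).headI.all fun ch => PySem.Chars.isalnum ch || ch == '_') &&
      ((List.splitOnP (· == '/') cs).tail.all fun part =>
        !part.isEmpty && part.all fun ch => PySem.Chars.isalnum ch || ch == '_'))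
      = pvRun false cs := by
  induction cs with
  | nil => simp [List.splitOnP_nil, pvRun]
  | cons a r ih =>
    obtain ⟨ih1, ih2⟩ := ih
    by_cases ha : a = '/'
    · subst ha
      refine ⟨by simp [List.splitOnP_cons, pvRun], ?_⟩
      simp only [List.splitOnP_cons, beq_self_eq_true, List.headI, List.tail]
      have hrun : pvRun false ('/' :: r) = pvRun true r := by simp [pvRun]
      simp [hrun, ih1]
    · obtain ⟨h, t, hht⟩ := List.exists_cons_of_ne_nil (List.splitOnP_ne_nil (· == '/') r)
      have hrun : pvRun false (a :: r) = (pvGood a && pvRun false r) := by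
        simp [pvRun, ha]
      have hrun2 : pvRun true (a :: r) = (pvGood a && pvRun false r) := by
        simp [pvRun, ha]
      rw [hht] at ih2; simp only [List.headI, List.tail] at ih2
      constructor
      · rw [List.splitOnP_cons]
        simp only [beq_iff_eq, if_neg ha, hht, List.modifyHead, List.all_cons, hrun2, ← ih2]
        simp [pvGood, Bool.and_assoc]
      · rw [List.splitOnP_cons]
        simp only [beq_iff_eq, if_neg ha, hht, List.modifyHead, List.headI, List.tail,
          List.all_cons, hrun, ← ih2]
        simp [pvGood, Bool.and_assoc]

theorem pvRun_iff (cs : List Char) (b : Bool) :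
    pvRun b cs = true ↔
      ((∀ c ∈ cs, pvGood c = true ∨ c = '/') ∧ ¬ (['/', '/'] <:+: cs) ∧
        ¬ (['/'] <:+ cs) ∧ (b = true → cs ≠ [] ∧ ¬ (['/'] <+: cs))) := by
  induction cs generalizing b with
  | nil => cases b <;> simp [pvRun]
  | cons a r ih =>
    by_cases ha : a = '/'
    · subst ha
      cases b
      · have hrun : pvRun false ('/' :: r) = pvRun true r := by simp [pvRun]
        rw [hrun, ih]
        have hpre2 : (['/', '/'] <+: '/' :: r) ↔ (['/'] <+: r) := by
          simp [List.cons_prefix_cons]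
        constructor
        · rintro ⟨h1, h2, h3, h4⟩
          obtain ⟨h4a, h4b⟩ := h4 rfl
          refine ⟨fun c hc => ?_, ?_, ?_, fun h => by simp at h⟩
          · rcases List.mem_cons.mp hc with rfl | hc
            · exact Or.inr rfl
            · exact h1 c hc
          · intro hinf
            rcases List.infix_cons_iff.mp hinf with hp | hi
            · exact h4b (hpre2.mp hp)
            · exact h2 hi
          · intro hsuf
            rcases List.suffix_cons_iff.mp hsuf with he | hs
            · have hre : r = [] := by cases he; rfl
              exact h4a hre
            · exact h3 hs
        · rintro ⟨h1, h2, h3, _⟩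
          refine ⟨fun c hc => h1 c (List.mem_cons_of_mem _ hc), ?_, ?_, fun _ => ⟨?_, ?_⟩⟩
          · exact fun hi => h2 (List.infix_cons_iff.mpr (Or.inr hi))
          · exact fun hs => h3 (List.suffix_cons_iff.mpr (Or.inr hs))
          · rintro rfl; exact h3 (List.suffix_cons_iff.mpr (Or.inl rfl))
          · exact fun hp => h2 (List.infix_cons_iff.mpr (Or.inl (hpre2.mpr hp)))
      · have hrun : pvRun true ('/' :: r) = false := by simp [pvRun]
        rw [hrun]
        constructor
        · intro h; exact absurd h (by simp)
        · rintro ⟨-, -, -, h4⟩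
          exact absurd (List.cons_prefix_cons.mpr ⟨rfl, List.nil_prefix⟩) (h4 rfl).2
    · have hrun : pvRun b (a :: r) = (pvGood a && pvRun false r) := by
        simp [pvRun, ha]
      have hinf : (['/', '/'] <:+: a :: r) ↔ (['/', '/'] <:+: r) := by
        constructor
        · intro h
          rcases List.infix_cons_iff.mp h with hp | hi
          · exact absurd (List.cons_prefix_cons.mp hp).1 (fun hh => ha hh.symm)
          · exact hi
        · exact fun h => List.infix_cons_iff.mpr (Or.inr h)
      have hsuf : (['/'] <:+ a :: r) ↔ (['/'] <:+ r) := by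
        constructor
        · intro h
          rcases List.suffix_cons_iff.mp h with he | hs
          · cases he; exact absurd rfl ha
          · exact hs
        · exact fun h => List.suffix_cons_iff.mpr (Or.inr h)
      have hpre : ¬ (['/'] <+: a :: r) := by
        intro hp; exact ha (List.cons_prefix_cons.mp hp).1.symm
      rw [hrun, Bool.and_eq_true, ih, hinf, hsuf]
      constructor
      · rintro ⟨hg, h1, h2, h3, -⟩
        refine ⟨fun c hc => ?_, h2, h3, fun _ => ⟨by simp, hpre⟩⟩
        rcases List.mem_cons.mp hc with rfl | hc
        · exact Or.inl hg
        · exact h1 c hc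
      · rintro ⟨h1, h2, h3, -⟩
        refine ⟨?_, fun c hc => h1 c (List.mem_cons_of_mem _ hc), h2, h3, fun h => by simp at h⟩
        rcases h1 a (List.mem_cons_self) with h | h
        · exact h
        · exact absurd h ha

theorem pv_isalpha_ne_slash {c : Char} (h : PySem.Chars.isalpha c = true) : c ≠ '/' := by
  rintro rfl; revert h; decide

-- ===== VERDICT (by name: the statement is the Claim_ definition above) =====
theorem is_valid_tag_spec : Claim_equal_is_valid_tag := by
  intro tag _
  unfold Spec_is_valid_tag is_valid_tag is_valid_tag_alt
  cases hc : tag.toList.dropWhile (· == '#') with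
  | nil => rfl
  | cons c r =>
    by_cases hα : PySem.Chars.isalpha c = true
    · simp only [hα, Bool.not_true, if_neg (by simp : ¬ (false = true))]
      have hso : List.splitOn '/' (c :: r) = List.splitOnP (· == '/') (c :: r) := rfl
      rw [hso, (pvSplit_eq_run (c :: r)).1]
      have hAeq :
          (if (!(c :: r).all fun ch => PySem.Chars.isalnum ch || (ch == '_' || ch == '/')) = true
            then false
           else if PySem.Chars.isIn ['/', '/'] (c :: r) = true then false
           else if PySem.Chars.endswith (c :: r) ['/'] = true then false
           else true) =
          (((c :: r).all fun ch => PySem.Chars.isalnum ch || (ch == '_' || ch == '/')) &&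
            !PySem.Chars.isIn ['/', '/'] (c :: r) && !PySem.Chars.endswith (c :: r) ['/']) := by
        cases h1 : (c :: r).all fun ch => PySem.Chars.isalnum ch || (ch == '_' || ch == '/') <;>
          cases h2 : PySem.Chars.isIn ['/', '/'] (c :: r) <;>
            cases h3 : PySem.Chars.endswith (c :: r) ['/'] <;> simp
      rw [hAeq, Bool.eq_iff_iff, pvRun_iff]
      rw [Bool.and_eq_true, Bool.and_eq_true, Bool.not_eq_true', Bool.not_eq_true']
      have hne := pv_isalpha_ne_slash hα
      constructor
      · rintro ⟨⟨hall, hIn⟩, hEnd⟩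
        rw [List.all_eq_true] at hall
        refine ⟨fun ch hch => ?_, ?_, ?_, fun _ => ⟨by simp, ?_⟩⟩
        · have hh := hall ch hch
          simp only [pvGood, Bool.or_eq_true, beq_iff_eq] at hh ⊢
          tauto
        · intro hinf
          have hI := (PySem.Chars.isIn_iff_infix (sub := ['/', '/']) (s := c :: r)).mpr hinf
          rw [hI] at hIn; exact absurd hIn (by simp)
        · intro hsuf
          have hE := (PySem.Chars.endswith_iff (s := c :: r) (p := ['/'])).mpr hsuf
          rw [hE] at hEnd; exact absurd hEnd (by simp)
        · intro hp
          exact hne (List.cons_prefix_cons.mp hp).1.symm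
      · rintro ⟨h1, h2, h3, -⟩
        refine ⟨⟨?_, ?_⟩, ?_⟩
        · rw [List.all_eq_true]
          intro ch hch
          rcases h1 ch hch with h | h
          · simp only [pvGood, Bool.or_eq_true, beq_iff_eq] at h ⊢; tauto
          · simp [h]
        · cases hI : PySem.Chars.isIn ['/', '/'] (c :: r)
          · rfl
          · exact absurd ((PySem.Chars.isIn_iff_infix (sub := ['/', '/']) (s := c :: r)).mp hI) h2
        · cases hE : PySem.Chars.endswith (c :: r) ['/']
          · rfl
          · exact absurd ((PySem.Chars.endswith_iff (s := c :: r) (p := ['/'])).mp hE) h3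
    · simp [hα]
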